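-- pv_equiv track=rewrite | github.com/khine-shwezin/wishingwell | LongestUniqueSubstring.py | findLongestWords
-- ===== SOURCE A (Python) =====
-- def findLongestWords(arr):
--     longestStrings=[]
--     longestLength=len(max(arr, key=len))
--     for x in arr:
--         if (len(x)==longestLength):
--             if x not in longestStrings: #s="BBBBB" to return only B
--                 longestStrings.append(x)
--     return longestStrings;
-- ===== SOURCE B (Python) =====
-- def findLongestWords(arr):
--     buckets = {}
--     for x in arr:
--         bucket = buckets.setdefault(len(x), [])
--         if x not in bucket:
--             bucket.append(x)
--     return buckets[max(buckets)]
-- ===== Notes on version B (the rewrite author's own statement) =====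
-- stated objective: alternative
-- what changed: Instead of precomputing the max length and then filter-deduplicating, B groups distinct strings into a dict of per-length buckets in one pass and returns the bucket of the largest key.
import Mathlib
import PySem

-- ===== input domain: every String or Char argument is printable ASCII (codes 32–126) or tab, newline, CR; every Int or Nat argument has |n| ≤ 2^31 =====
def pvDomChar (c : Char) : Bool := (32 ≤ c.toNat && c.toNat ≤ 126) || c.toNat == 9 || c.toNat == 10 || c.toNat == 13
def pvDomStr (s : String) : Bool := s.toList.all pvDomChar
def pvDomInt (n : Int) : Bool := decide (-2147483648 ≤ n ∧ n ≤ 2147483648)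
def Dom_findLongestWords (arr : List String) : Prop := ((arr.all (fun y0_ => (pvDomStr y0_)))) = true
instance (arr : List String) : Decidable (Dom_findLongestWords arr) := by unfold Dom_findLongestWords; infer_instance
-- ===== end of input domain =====

-- B groups distinct strings into per-length buckets in one pass and returns the bucket of the
-- largest key, instead of A's precomputed max length followed by a filter-with-dedup scan.

-- ===== PORT A =====
def findLongestWords (arr : List String) : List String :=
  match PySem.List.max? arr (fun s => PySem.Str.len s) with
  | none => []   -- max() raises ValueError on empty arr; excluded by Pre_
  | some m =>
    let longestLength := PySem.Str.len m
    arr.foldl (fun acc x =>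
      if PySem.Str.len x = longestLength then
        if acc.contains x then acc else acc ++ [x]
      else acc) []

-- ===== PORT B =====
def findLongestWords_alt (arr : List String) : List String :=
  let d : PySem.Dict Int (List String) :=
    arr.foldl (fun d x =>
      let bucket := d.getD (PySem.Str.len x) []
      d.insert (PySem.Str.len x)
        (if bucket.contains x then bucket else bucket ++ [x]))   -- setdefault + in-place append
      PySem.Dict.empty
  match PySem.List.max? d.keys (fun k => k) with
  | none => []   -- max() raises ValueError on empty dict; excluded by Pre_
  | some L => d.getD L []

-- ===== PRECONDITION & SPEC =====
-- Pre_ excludes only the empty list, on which both A and B raise ValueError (max of empty sequence).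
def Pre_findLongestWords (arr : List String) : Prop := arr ≠ []
instance (arr : List String) : Decidable (Pre_findLongestWords arr) := by unfold Pre_findLongestWords; infer_instance
def pvWitness_findLongestWords : List String := (["ab", "c", "ba", "ab"])
def Spec_findLongestWords (arr : List String) (out : List String) : Prop := out = findLongestWords_alt arr
instance (arr : List String) (out : List String) : Decidable (Spec_findLongestWords arr out) := by unfold Spec_findLongestWords; infer_instance

-- ===== CLAIM (what is proved, stated in full; the proofs are below) =====
def Claim_equal_findLongestWords : Prop := ∀ (arr : List String), Dom_findLongestWords arr → Pre_findLongestWords arr → Spec_findLongestWords arr (findLongestWords arr)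

-- ===== LEMMAS AND PROOFS =====

-- B's bucket for key k is exactly A's filter-with-dedup fold restricted to length k.
theorem bucket_getD (l : List String) (d : PySem.Dict Int (List String)) (k : Int) :
    (l.foldl (fun d x =>
      let bucket := d.getD (PySem.Str.len x) []
      d.insert (PySem.Str.len x)
        (if bucket.contains x then bucket else bucket ++ [x])) d).getD k []
    = l.foldl (fun acc x =>
        if PySem.Str.len x = k then
          if acc.contains x then acc else acc ++ [x]
        else acc) (d.getD k []) := by
  induction l generalizing d with
  | nil => rfl
  | cons x t ih =>
    simp only [List.foldl_cons, ih, PySem.Dict.getD_insert]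
    by_cases h : (x.length : Int) = k
    · simp [PySem.Str.len, h]
    · simp [PySem.Str.len, h, Ne.symm h]

theorem keys_buckets (l : List String) :
    (l.foldl (fun d x =>
      let bucket := d.getD (PySem.Str.len x) []
      d.insert (PySem.Str.len x)
        (if bucket.contains x then bucket else bucket ++ [x]))
      (PySem.Dict.empty : PySem.Dict Int (List String))).keys
    = PySem.Set.ofList (l.map (fun s => PySem.Str.len s)) := by
  rw [PySem.Dict.keys_foldl_insert_key
      (f := fun d x =>
        let bucket := d.getD (PySem.Str.len x) []
        if bucket.contains x then bucket else bucket ++ [x])]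
  simp [PySem.Dict.keys_empty, PySem.Set.update_nil_left]
  rfl

-- ===== VERDICT (by name: the statement is the Claim_ definition above) =====
theorem findLongestWords_spec : Claim_equal_findLongestWords := by
  intro arr _ hpre
  unfold Spec_findLongestWords findLongestWords findLongestWords_alt
  -- A's max element
  obtain ⟨m, hm⟩ : ∃ m, PySem.List.max? arr (fun s => PySem.Str.len s) = some m := by
    cases h : PySem.List.max? arr (fun s => PySem.Str.len s) with
    | none => exact absurd ((PySem.List.max?_eq_none_iff _ _).mp h) hpre
    | some m => exact ⟨m, rfl⟩
  -- B's max key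
  have hkeys := keys_buckets arr
  obtain ⟨L, hL⟩ : ∃ L, PySem.List.max?
      ((arr.foldl (fun d x =>
        let bucket := d.getD (PySem.Str.len x) []
        d.insert (PySem.Str.len x)
          (if bucket.contains x then bucket else bucket ++ [x]))
        (PySem.Dict.empty : PySem.Dict Int (List String))).keys) (fun k => k) = some L := by
    cases h : PySem.List.max? _ (fun k : Int => k) with
    | none =>
      have := (PySem.List.max?_eq_none_iff _ _).mp h
      rw [hkeys] at this
      cases arr with
      | nil => exact absurd rfl hpre
      | cons a t =>
        have hmem := (PySem.Set.mem_ofList (List.map (fun s => PySem.Str.len s) (a :: t))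
          (PySem.Str.len a)).mpr (by simp)
        rw [this] at hmem
        simp at hmem
    | some L => exact ⟨L, rfl⟩
  -- L = len m
  have hLmem : L ∈ arr.map (fun s => PySem.Str.len s) := by
    have := PySem.List.max?_mem hL
    rw [hkeys] at this
    exact (PySem.Set.mem_ofList _ _).mp this
  obtain ⟨x, hx, hxL⟩ := List.mem_map.mp hLmem
  have h1 : L ≤ PySem.Str.len m := hxL ▸ PySem.List.max?_isMax hm x hx
  have h2 : PySem.Str.len m ≤ L := by
    apply PySem.List.max?_isMax hL
    rw [hkeys]
    exact (PySem.Set.mem_ofList _ _).mpr (List.mem_map_of_mem (PySem.List.max?_mem hm))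
  have hLm : L = PySem.Str.len m := le_antisymm h1 h2
  simp only [hm, hL, bucket_getD, PySem.Dict.getD_empty, hLm]
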